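-- pv_equiv track=rewrite | github.com/alexespencer/euler | src/euler/solutions/p90.py | solution_valid
-- ===== SOURCE A (Python) =====
-- def solution_valid(cube1, cube2, squares):
--     # If a 6 or 9 is in either cube, add both 6 and 9 to the set (as they can be spun around)
--     cubes = [set(cube1), set(cube2)]
--     for cube in cubes:
--         if "6" in cube or "9" in cube:
--             cube.add("6")
--             cube.add("9")
--
--     # Can each square be represented by the cubes?
--     for square in squares:
--         if not (
--             (square[0] in cubes[0] and square[1] in cubes[1])
--             or (square[0] in cubes[1] and square[1] in cubes[0])
--         ):
--             return False, None
--
--     return True, cubes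
-- ===== SOURCE B (Python) =====
-- def solution_valid(cube1, cube2, squares):
--     def augment(faces):
--         s = set(faces)
--         if "6" in s or "9" in s:
--             s.add("6")
--             s.add("9")
--         return s
--
--     c0 = augment(cube1)
--     c1 = augment(cube2)
--
--     # Set algebra over the distinct squares: a square is unrepresentable exactly
--     # when it fails in the direct orientation AND in the swapped orientation.
--     distinct = set(squares)
--     direct_fail = {sq for sq in distinct if sq[0] not in c0 or sq[1] not in c1}
--     swapped_fail = {sq for sq in distinct if sq[0] not in c1 or sq[1] not in c0}
--
--     if direct_fail & swapped_fail:
--         return False, None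
--     return True, [c0, c1]
-- ===== Notes on version B (the rewrite author's own statement) =====
-- stated objective: alternative
-- what changed: Instead of A's single early-return loop testing each square with a two-way disjunction, B deduplicates the squares and computes two independent failure sets (direct orientation, swapped orientation) by set comprehensions, answering False iff their intersection is non-empty.
import Mathlib
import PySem

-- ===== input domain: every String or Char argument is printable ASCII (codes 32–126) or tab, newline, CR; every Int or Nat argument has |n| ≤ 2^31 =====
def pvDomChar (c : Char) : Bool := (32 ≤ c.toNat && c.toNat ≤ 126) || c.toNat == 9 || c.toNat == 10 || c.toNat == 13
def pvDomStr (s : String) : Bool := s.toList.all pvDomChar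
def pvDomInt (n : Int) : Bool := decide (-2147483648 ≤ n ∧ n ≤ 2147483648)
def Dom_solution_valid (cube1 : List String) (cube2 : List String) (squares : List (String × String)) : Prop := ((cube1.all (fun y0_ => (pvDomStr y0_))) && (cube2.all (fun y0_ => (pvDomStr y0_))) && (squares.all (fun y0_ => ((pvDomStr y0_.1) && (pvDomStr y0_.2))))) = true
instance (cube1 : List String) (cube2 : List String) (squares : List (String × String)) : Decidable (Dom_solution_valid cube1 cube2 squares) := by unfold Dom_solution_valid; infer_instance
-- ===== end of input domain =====

-- B deduplicates the squares and computes two independent failure sets (direct and swapped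
-- orientation) by set comprehensions, answering False iff their intersection is non-empty,
-- instead of A's per-square two-way disjunctive test with early return; same results.
-- Python 'set' values are modelled as PySem.Set; the returned cube lists are lists of Sets.

-- ===== PORT A =====
def pvLoopA (c0 c1 : PySem.Set String) : List (String × String) → Bool × Option (List (List String))
  | [] => (true, some [c0, c1])
  | sq :: rest =>
      if !((PySem.Set.contains c0 sq.1 && PySem.Set.contains c1 sq.2)
           || (PySem.Set.contains c1 sq.1 && PySem.Set.contains c0 sq.2)) then
        (false, none)
      else
        pvLoopA c0 c1 rest

def solution_valid (cube1 : List String) (cube2 : List String) (squares : List (String × String)) : Bool × Option (List (List String)) :=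
  let c0 := PySem.Set.ofList cube1
  let c0 := if PySem.Set.contains c0 "6" || PySem.Set.contains c0 "9" then
              PySem.Set.add (PySem.Set.add c0 "6") "9" else c0
  let c1 := PySem.Set.ofList cube2
  let c1 := if PySem.Set.contains c1 "6" || PySem.Set.contains c1 "9" then
              PySem.Set.add (PySem.Set.add c1 "6") "9" else c1
  pvLoopA c0 c1 squares

-- ===== PORT B =====
def pvAugment (faces : List String) : PySem.Set String :=
  let s := PySem.Set.ofList faces
  if PySem.Set.contains s "6" || PySem.Set.contains s "9" then
    PySem.Set.add (PySem.Set.add s "6") "9" else s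

-- direct_fail / swapped_fail: set comprehensions over the deduplicated squares
def pvDirectFail (c0 c1 : PySem.Set String) (distinct : PySem.Set (String × String)) : PySem.Set (String × String) :=
  distinct.filter (fun sq => !(PySem.Set.contains c0 sq.1) || !(PySem.Set.contains c1 sq.2))

def pvSwappedFail (c0 c1 : PySem.Set String) (distinct : PySem.Set (String × String)) : PySem.Set (String × String) :=
  distinct.filter (fun sq => !(PySem.Set.contains c1 sq.1) || !(PySem.Set.contains c0 sq.2))

def solution_valid_alt (cube1 : List String) (cube2 : List String) (squares : List (String × String)) : Bool × Option (List (List String)) :=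
  let c0 := pvAugment cube1
  let c1 := pvAugment cube2
  let distinct := PySem.Set.ofList squares
  let directFail := pvDirectFail c0 c1 distinct
  let swappedFail := pvSwappedFail c0 c1 distinct
  if PySem.Set.inter directFail swappedFail ≠ [] then
    (false, none)
  else
    (true, some [c0, c1])

-- ===== PRECONDITION & SPEC =====
def Spec_solution_valid (cube1 : List String) (cube2 : List String) (squares : List (String × String)) (out : Bool × Option (List (List String))) : Prop := out = solution_valid_alt cube1 cube2 squares
instance (cube1 : List String) (cube2 : List String) (squares : List (String × String)) (out : Bool × Option (List (List String))) : Decidable (Spec_solution_valid cube1 cube2 squares out) := by unfold Spec_solution_valid; infer_instance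

-- ===== CLAIM (what is proved, stated in full; the proofs are below) =====
def Claim_equal_solution_valid : Prop := ∀ (cube1 : List String) (cube2 : List String) (squares : List (String × String)), Dom_solution_valid cube1 cube2 squares → Spec_solution_valid cube1 cube2 squares (solution_valid cube1 cube2 squares)

-- ===== LEMMAS AND PROOFS =====

lemma pvLoopA_eq_all (c0 c1 : PySem.Set String) (squares : List (String × String)) :
    pvLoopA c0 c1 squares
      = if squares.all (fun sq => (PySem.Set.contains c0 sq.1 && PySem.Set.contains c1 sq.2)
          || (PySem.Set.contains c1 sq.1 && PySem.Set.contains c0 sq.2)) then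
          (true, some [c0, c1])
        else (false, none) := by
  induction squares with
  | nil => rfl
  | cons sq rest ih =>
      cases h : ((PySem.Set.contains c0 sq.1 && PySem.Set.contains c1 sq.2)
          || (PySem.Set.contains c1 sq.1 && PySem.Set.contains c0 sq.2)) <;>
        simp only [pvLoopA, List.all_cons, h, Bool.not_true, Bool.not_false, Bool.false_and,
          Bool.true_and, ih, Bool.false_eq_true, reduceIte]

lemma pvInter_empty_iff (c0 c1 : PySem.Set String) (squares : List (String × String)) :
    PySem.Set.inter (pvDirectFail c0 c1 (PySem.Set.ofList squares))
        (pvSwappedFail c0 c1 (PySem.Set.ofList squares)) = ([] : List (String × String))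
      ↔ squares.all (fun sq => (PySem.Set.contains c0 sq.1 && PySem.Set.contains c1 sq.2)
          || (PySem.Set.contains c1 sq.1 && PySem.Set.contains c0 sq.2)) = true := by
  rw [List.eq_nil_iff_forall_not_mem, List.all_eq_true]
  constructor
  · intro h sq hsq
    have hm := h sq
    simp only [PySem.Set.mem_inter, pvDirectFail, pvSwappedFail, List.mem_filter,
      PySem.Set.mem_ofList, hsq, true_and, not_and] at hm
    cases hd0 : PySem.Set.contains c0 sq.1 <;> cases hd1 : PySem.Set.contains c1 sq.2 <;>
      cases hs0 : PySem.Set.contains c1 sq.1 <;> cases hs1 : PySem.Set.contains c0 sq.2 <;>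
      simp_all
  · intro h sq
    simp only [PySem.Set.mem_inter, pvDirectFail, pvSwappedFail, List.mem_filter,
      PySem.Set.mem_ofList]
    rintro ⟨⟨hsq, hd⟩, -, hs⟩
    have htot := h sq hsq
    clear h
    cases hd0 : PySem.Set.contains c0 sq.1 <;> cases hd1 : PySem.Set.contains c1 sq.2 <;>
      cases hs0 : PySem.Set.contains c1 sq.1 <;> cases hs1 : PySem.Set.contains c0 sq.2 <;>
      simp_all

-- ===== VERDICT (by name: the statement is the Claim_ definition above) =====
theorem solution_valid_spec : Claim_equal_solution_valid := by
  intro cube1 cube2 squares _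
  show solution_valid cube1 cube2 squares = solution_valid_alt cube1 cube2 squares
  have hA : solution_valid cube1 cube2 squares
      = pvLoopA (pvAugment cube1) (pvAugment cube2) squares := rfl
  rw [hA, pvLoopA_eq_all]
  unfold solution_valid_alt
  by_cases hE : PySem.Set.inter (pvDirectFail (pvAugment cube1) (pvAugment cube2) (PySem.Set.ofList squares))
      (pvSwappedFail (pvAugment cube1) (pvAugment cube2) (PySem.Set.ofList squares)) = ([] : List (String × String))
  · rw [if_pos ((pvInter_empty_iff _ _ _).mp hE)]
    simp only [hE, ne_eq, not_true_eq_false, if_false]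
  · rw [if_neg (fun hall => hE ((pvInter_empty_iff _ _ _).mpr hall))]
    simp only [ne_eq, hE, not_false_eq_true, if_true]
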